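-- pv_equiv track=rewrite | github.com/mSvcBench/NetSatBench | control/scheduler_metis.py | _build_csr
-- ===== SOURCE A (Python) =====
-- from typing import Any, Dict, List, Optional, Set, Tuple
--
-- def _build_csr(
--     node_indices: List[int],
--     edge_weight:  Dict[Tuple[int, int], int],
--     node_weight:  Dict[int, int],
-- ) -> Tuple[List[int], List[int], List[int], List[int]]:
--     """Build pymetis CSR arrays for the subgraph induced by node_indices."""
--     local = {g: l for l, g in enumerate(node_indices)}
--     n = len(node_indices)
--     adj: List[List[Tuple[int, int]]] = [[] for _ in range(n)]
--
--     for (a, b), w in edge_weight.items():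
--         if a in local and b in local and w > 0:
--             la, lb = local[a], local[b]
--             adj[la].append((lb, int(w)))
--             adj[lb].append((la, int(w)))
--
--     for row in adj:
--         row.sort()
--
--     xadj, adjncy, ew = [0], [], []
--     for row in adj:
--         for v, w in row:
--             adjncy.append(v)
--             ew.append(w)
--         xadj.append(len(adjncy))
--
--     vw = [node_weight.get(node_indices[i], 1) for i in range(n)]
--     return xadj, adjncy, ew, vw
-- ===== SOURCE B (Python) =====
-- def _build_csr(node_indices, edge_weight, node_weight):
--     local = {g: l for l, g in enumerate(node_indices)}
--     n = len(node_indices)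
--     kept = []
--     for (a, b), w in edge_weight.items():
--         if a in local and b in local and w > 0:
--             kept.append((local[a], local[b], int(w)))
--             kept.append((local[b], local[a], int(w)))
--     xadj, adjncy, ew = [0], [], []
--     for i in range(n):
--         row = sorted((lb, w) for la, lb, w in kept if la == i)
--         adjncy.extend(v for v, _ in row)
--         ew.extend(w for _, w in row)
--         xadj.append(len(adjncy))
--     vw = [node_weight.get(g, 1) for g in node_indices]
--     return xadj, adjncy, ew, vw
-- ===== Notes on version B (the rewrite author's own statement) =====
-- stated objective: alternative
-- what changed: B collects all kept directed edges in one flat list and builds each CSR row by filtering and sorting that flat list per node, instead of A's mutable array of per-node buckets filled by indexed in-place appends and sorted row by row.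
import Mathlib
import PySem

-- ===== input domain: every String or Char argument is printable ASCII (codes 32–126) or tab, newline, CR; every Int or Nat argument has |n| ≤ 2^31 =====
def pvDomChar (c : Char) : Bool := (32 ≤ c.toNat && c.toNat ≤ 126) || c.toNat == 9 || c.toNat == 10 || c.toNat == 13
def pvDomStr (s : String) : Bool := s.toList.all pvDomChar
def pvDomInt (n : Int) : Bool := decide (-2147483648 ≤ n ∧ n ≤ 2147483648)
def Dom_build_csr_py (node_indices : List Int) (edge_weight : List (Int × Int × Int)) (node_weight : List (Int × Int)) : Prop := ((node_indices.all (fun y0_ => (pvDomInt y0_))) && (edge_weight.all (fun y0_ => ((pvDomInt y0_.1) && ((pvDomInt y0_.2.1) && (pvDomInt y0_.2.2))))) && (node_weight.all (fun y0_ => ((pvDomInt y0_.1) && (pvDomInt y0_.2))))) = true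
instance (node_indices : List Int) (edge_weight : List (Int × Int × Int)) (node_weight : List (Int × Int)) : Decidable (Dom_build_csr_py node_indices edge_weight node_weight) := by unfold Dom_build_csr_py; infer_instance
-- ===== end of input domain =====

-- B replaces A's mutable per-node bucket array with one flat pass collecting kept directed
-- edges and a per-row filter+sort; same return value, different decomposition (no speed claim).
-- ===== PORT A =====
-- local = {g: l for l, g in enumerate(node_indices)}   (shared: identical line in A and B)
def pvLocal (node_indices : List Int) : PySem.Dict Int Int :=
  (PySem.List.enumerate node_indices 0).foldl (fun d p => d.insert p.2 p.1) PySem.Dict.empty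

-- the edge guard 'a in local and b in local and w > 0'  (shared: identical line in A and B)
def pvGuard (L : PySem.Dict Int Int) (t : Int × Int × Int) : Bool :=
  L.contains t.1 && L.contains t.2.1 && decide (0 < t.2.2)

-- the fill loop body: adj[la].append((lb, int(w))); adj[lb].append((la, int(w)))
def pvFillStep (L : PySem.Dict Int Int) (adj : List (List (Int × Int))) (t : Int × Int × Int) :
    List (List (Int × Int)) :=
  if pvGuard L t then
    let la := L.getD t.1 0
    let lb := L.getD t.2.1 0
    let adj1 := adj.set la.toNat (adj.getD la.toNat [] ++ [(lb, t.2.2)])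
    adj1.set lb.toNat (adj1.getD lb.toNat [] ++ [(la, t.2.2)])
  else adj

def pvAdjA (L : PySem.Dict Int Int) (adj0 : List (List (Int × Int))) (es : List (Int × Int × Int)) :
    List (List (Int × Int)) :=
  es.foldl (pvFillStep L) adj0

-- the emit loop: per row append each (v, w) to adjncy/ew one by one, then xadj.append(len(adjncy))
def pvStepA (s : List Int × List Int × List Int) (row : List (Int × Int)) :
    List Int × List Int × List Int :=
  let q := row.foldl (fun (q : List Int × List Int) p => (q.1 ++ [p.1], q.2 ++ [p.2])) (s.2.1, s.2.2)
  (s.1 ++ [(q.1.length : Int)], q.1, q.2)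

def build_csr_py (node_indices : List Int) (edge_weight : List (Int × Int × Int)) (node_weight : List (Int × Int)) : List Int × List Int × List Int × List Int :=
  let L := pvLocal node_indices
  let n := node_indices.length
  let adj := pvAdjA L (List.replicate n []) edge_weight
  let adj := adj.map (fun row => PySem.List.sorted2 row (fun p => p.1) (fun p => p.2))
  let s := adj.foldl pvStepA ([0], [], [])
  let vw := (List.range n).map (fun i => (PySem.Dict.mk node_weight).getD (node_indices.getD i 0) 1)
  (s.1, s.2.1, s.2.2, vw)

-- ===== PORT B =====
-- one pass: flat list of kept directed edges (la, lb, w) in both directions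
def pvKeptB (L : PySem.Dict Int Int) (es : List (Int × Int × Int)) : List (Int × Int × Int) :=
  es.foldl (fun ks t =>
    if pvGuard L t then
      ks ++ [(L.getD t.1 0, L.getD t.2.1 0, t.2.2), (L.getD t.2.1 0, L.getD t.1 0, t.2.2)]
    else ks) []

-- row = sorted((lb, w) for la, lb, w in kept if la == i)
def pvRowB (kept : List (Int × Int × Int)) (i : Nat) : List (Int × Int) :=
  PySem.List.sorted2 ((kept.filter (fun t => t.1 == (i : Int))).map (fun t => t.2))
    (fun p => p.1) (fun p => p.2)

-- adjncy.extend(...); ew.extend(...); xadj.append(len(adjncy))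
def pvStepB (kept : List (Int × Int × Int)) (s : List Int × List Int × List Int) (i : Nat) :
    List Int × List Int × List Int :=
  let adjncy := s.2.1 ++ (pvRowB kept i).map (fun p => p.1)
  (s.1 ++ [(adjncy.length : Int)], adjncy, s.2.2 ++ (pvRowB kept i).map (fun p => p.2))

def build_csr_py_alt (node_indices : List Int) (edge_weight : List (Int × Int × Int)) (node_weight : List (Int × Int)) : List Int × List Int × List Int × List Int :=
  let L := pvLocal node_indices
  let n := node_indices.length
  let kept := pvKeptB L edge_weight
  let s := (List.range n).foldl (pvStepB kept) ([0], [], [])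
  let vw := node_indices.map (fun g => (PySem.Dict.mk node_weight).getD g 1)
  (s.1, s.2.1, s.2.2, vw)

-- ===== PRECONDITION & SPEC =====
def Spec_build_csr_py (node_indices : List Int) (edge_weight : List (Int × Int × Int)) (node_weight : List (Int × Int)) (out : List Int × List Int × List Int × List Int) : Prop := out = build_csr_py_alt node_indices edge_weight node_weight
instance (node_indices : List Int) (edge_weight : List (Int × Int × Int)) (node_weight : List (Int × Int)) (out : List Int × List Int × List Int × List Int) : Decidable (Spec_build_csr_py node_indices edge_weight node_weight out) := by unfold Spec_build_csr_py; infer_instance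

-- ===== CLAIM (what is proved, stated in full; the proofs are below) =====
def Claim_equal_build_csr_py : Prop := ∀ (node_indices : List Int) (edge_weight : List (Int × Int × Int)) (node_weight : List (Int × Int)), Dom_build_csr_py node_indices edge_weight node_weight → Spec_build_csr_py node_indices edge_weight node_weight (build_csr_py node_indices edge_weight node_weight)

-- ===== LEMMAS AND PROOFS =====

-- pvDirs: the two directed edges a kept undirected edge contributes (proof-side view of both loops)
def pvDirs (L : PySem.Dict Int Int) (t : Int × Int × Int) : List (Int × Int × Int) :=
  if pvGuard L t then
    [(L.getD t.1 0, L.getD t.2.1 0, t.2.2), (L.getD t.2.1 0, L.getD t.1 0, t.2.2)]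
  else []

lemma pvLocal_aux (l : List (Int × Int)) (d : PySem.Dict Int Int) (g v : Int)
    (h : (l.foldl (fun d p => d.insert p.2 p.1) d).get? g = some v) :
    d.get? g = some v ∨ (v, g) ∈ l := by
  induction l generalizing d with
  | nil => exact Or.inl h
  | cons p rest ih =>
    rcases ih (d.insert p.2 p.1) h with h1 | h2
    · rw [PySem.Dict.get?_insert] at h1
      by_cases hg : g = p.2
      · simp [hg] at h1
        right; simp [← h1, hg]
      · simp [hg] at h1
        exact Or.inl h1
    · right; simp [h2]

lemma pvLocal_get_bound (ni : List Int) (g v : Int) (h : (pvLocal ni).get? g = some v) :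
    0 ≤ v ∧ v < (ni.length : Int) := by
  rcases pvLocal_aux _ _ _ _ h with h1 | h2
  · simp [PySem.Dict.get?_empty] at h1
  · rw [PySem.List.mem_enumerate_iff] at h2
    obtain ⟨k, hk, hp⟩ := h2
    have : v = (k : Int) := by simpa using congrArg Prod.fst hp
    omega

lemma pvLocal_getD_bound (ni : List Int) (g : Int) (h : (pvLocal ni).contains g = true) :
    0 ≤ (pvLocal ni).getD g 0 ∧ (pvLocal ni).getD g 0 < (ni.length : Int) := by
  rw [PySem.Dict.contains_eq_isSome_get?] at h
  obtain ⟨v, hv⟩ := Option.isSome_iff_exists.mp h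
  rw [PySem.Dict.getD_of_get?_eq_some _ 0 hv]
  exact pvLocal_get_bound ni g v hv

lemma pvKeptB_eq_flatMap (L : PySem.Dict Int Int) (es : List (Int × Int × Int)) :
    pvKeptB L es = es.flatMap (pvDirs L) := by
  suffices h : ∀ (es : List (Int × Int × Int)) (init : List (Int × Int × Int)),
      (es.foldl (fun ks t =>
        if pvGuard L t then
          ks ++ [(L.getD t.1 0, L.getD t.2.1 0, t.2.2), (L.getD t.2.1 0, L.getD t.1 0, t.2.2)]
        else ks) init) = init ++ es.flatMap (pvDirs L) by
    simpa using h es []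
  intro es
  induction es with
  | nil => simp
  | cons t rest ih =>
    intro init
    simp only [List.foldl_cons, List.flatMap_cons, pvDirs]
    split_ifs with hg <;> simp [ih]

lemma pv_getD_set (l : List (List (Int × Int))) (j : Nat) (x : List (Int × Int)) (i : Nat) :
    ((l.set j x).getD i []) = if j = i ∧ j < l.length then x else l.getD i [] := by
  simp [List.getD_eq_getElem?_getD, List.getElem?_set]
  split_ifs with h1 h2 h3 <;> simp_all
  omega

lemma pvFillStep_length (L : PySem.Dict Int Int) (adj : List (List (Int × Int)))
    (t : Int × Int × Int) : (pvFillStep L adj t).length = adj.length := by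
  simp only [pvFillStep]
  split_ifs <;> simp

lemma pvAdjA_length (L : PySem.Dict Int Int) (adj : List (List (Int × Int)))
    (es : List (Int × Int × Int)) : (pvAdjA L adj es).length = adj.length := by
  induction es generalizing adj with
  | nil => rfl
  | cons t rest ih =>
    rw [show pvAdjA L adj (t :: rest) = pvAdjA L (pvFillStep L adj t) rest from rfl,
      ih, pvFillStep_length]

lemma pvAdjA_getD (ni : List Int) (es : List (Int × Int × Int))
    (adj : List (List (Int × Int))) (hlen : adj.length = ni.length) (i : Nat) :
    (pvAdjA (pvLocal ni) adj es).getD i [] =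
      adj.getD i [] ++
        ((es.flatMap (pvDirs (pvLocal ni))).filter (fun t => t.1 == (i : Int))).map
          (fun t => t.2) := by
  induction es generalizing adj with
  | nil => simp [pvAdjA]
  | cons t rest ih =>
    rw [show pvAdjA (pvLocal ni) adj (t :: rest)
        = pvAdjA (pvLocal ni) (pvFillStep (pvLocal ni) adj t) rest from rfl,
      ih _ (by rw [pvFillStep_length]; exact hlen)]
    by_cases hg : pvGuard (pvLocal ni) t = true
    · have hca : (pvLocal ni).contains t.1 = true := by
        simp [pvGuard] at hg; exact hg.1.1
      have hcb : (pvLocal ni).contains t.2.1 = true := by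
        simp [pvGuard] at hg; exact hg.1.2
      obtain ⟨hla0, hlan⟩ := pvLocal_getD_bound ni t.1 hca
      obtain ⟨hlb0, hlbn⟩ := pvLocal_getD_bound ni t.2.1 hcb
      simp only [List.flatMap_cons, List.filter_append, List.map_append, pvDirs, hg, if_pos,
        pvFillStep, ← List.append_assoc]
      congr 1
      rw [pv_getD_set, pv_getD_set, pv_getD_set]
      simp only [List.length_set]
      by_cases h2 : ((pvLocal ni).getD t.2.1 0).toNat = i
      · rw [if_pos ⟨h2, by omega⟩]
        by_cases h1 : ((pvLocal ni).getD t.1 0).toNat = ((pvLocal ni).getD t.2.1 0).toNat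
        · rw [if_pos ⟨h1, by omega⟩]
          simp [show (pvLocal ni).getD t.1 0 = (i : Int) from by omega,
            show (pvLocal ni).getD t.2.1 0 = (i : Int) from by omega]
        · rw [if_neg (fun h => h1 h.1)]
          simp [show ¬((pvLocal ni).getD t.1 0 = (i : Int)) from by omega,
            show (pvLocal ni).getD t.2.1 0 = (i : Int) from by omega]
      · rw [if_neg (fun h => h2 h.1)]
        by_cases h1 : ((pvLocal ni).getD t.1 0).toNat = i
        · rw [if_pos ⟨h1, by omega⟩]
          simp [show (pvLocal ni).getD t.1 0 = (i : Int) from by omega,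
            show ¬((pvLocal ni).getD t.2.1 0 = (i : Int)) from by omega]
        · rw [if_neg (fun h => h1 h.1)]
          simp [show ¬((pvLocal ni).getD t.1 0 = (i : Int)) from by omega,
            show ¬((pvLocal ni).getD t.2.1 0 = (i : Int)) from by omega]
    · have hg' : pvGuard (pvLocal ni) t = false := by simpa using hg
      simp [pvFillStep, pvDirs, hg']

lemma pvStepA_eq (s : List Int × List Int × List Int) (row : List (Int × Int)) :
    pvStepA s row =
      (s.1 ++ [((s.2.1 ++ row.map (fun p => p.1)).length : Int)],
       s.2.1 ++ row.map (fun p => p.1), s.2.2 ++ row.map (fun p => p.2)) := by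
  suffices h : ∀ (row : List (Int × Int)) (q : List Int × List Int),
      row.foldl (fun (q : List Int × List Int) p => (q.1 ++ [p.1], q.2 ++ [p.2])) q
        = (q.1 ++ row.map (fun p => p.1), q.2 ++ row.map (fun p => p.2)) by
    simp [pvStepA, h]
  intro row
  induction row with
  | nil => simp
  | cons p rest ih => intro q; simp [ih]

lemma pv_foldl_range (rows : List (List (Int × Int))) (g : Nat → List (Int × Int))
    (hg : ∀ i (hi : i < rows.length), rows[i] = g i) (s0 : List Int × List Int × List Int) :
    rows.foldl pvStepA s0 =
      (List.range rows.length).foldl (fun s i => pvStepA s (g i)) s0 := by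
  have hrows : (List.range rows.length).map g = rows := by
    apply List.ext_getElem <;> simp
    intro i h1 h2
    exact (hg i h2).symm
  conv_lhs => rw [← hrows]
  rw [List.foldl_map]

lemma pv_vw_eq (ni : List Int) (nw : List (Int × Int)) :
    (List.range ni.length).map (fun i => (PySem.Dict.mk nw).getD (ni.getD i 0) 1) =
      ni.map (fun g => (PySem.Dict.mk nw).getD g 1) := by
  apply List.ext_getElem <;> simp
  intro i h1 h2
  simp [List.getElem?_eq_getElem h1]

-- ===== VERDICT (by name: the statement is the Claim_ definition above) =====
lemma pvStep_eq (kept : List (Int × Int × Int)) (s : List Int × List Int × List Int) (i : Nat) :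
    pvStepA s (pvRowB kept i) = pvStepB kept s i := by
  rw [pvStepA_eq]; rfl

lemma pv_rows_eq (ni : List Int) (ew : List (Int × Int × Int)) (i : Nat)
    (hi : i < (pvAdjA (pvLocal ni) (List.replicate ni.length []) ew).length) :
    ((pvAdjA (pvLocal ni) (List.replicate ni.length []) ew).map
        (fun row => PySem.List.sorted2 row (fun p => p.1) (fun p => p.2)))[i]'(by simpa using hi) =
      pvRowB (pvKeptB (pvLocal ni) ew) i := by
  rw [List.getElem_map]
  rw [show (pvAdjA (pvLocal ni) (List.replicate ni.length []) ew)[i]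
      = (pvAdjA (pvLocal ni) (List.replicate ni.length []) ew).getD i [] from
    (List.getD_eq_getElem _ _ hi).symm]
  rw [pvAdjA_getD ni ew _ (by simp) i]
  rw [pvRowB, pvKeptB_eq_flatMap]
  simp

theorem build_csr_py_spec : Claim_equal_build_csr_py := by
  intro ni ew nw _dom
  unfold Spec_build_csr_py
  simp only [build_csr_py, build_csr_py_alt]
  have hAlen : (pvAdjA (pvLocal ni) (List.replicate ni.length []) ew).length = ni.length := by
    rw [pvAdjA_length]; simp
  have hfold := pv_foldl_range
    ((pvAdjA (pvLocal ni) (List.replicate ni.length []) ew).map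
      (fun row => PySem.List.sorted2 row (fun p => p.1) (fun p => p.2)))
    (pvRowB (pvKeptB (pvLocal ni) ew))
    (by intro i hi; exact pv_rows_eq ni ew i (by simpa using hi)) ([0], [], [])
  rw [hfold]
  have hsteps : (fun (s : List Int × List Int × List Int) (i : Nat) =>
      pvStepA s (pvRowB (pvKeptB (pvLocal ni) ew) i)) = pvStepB (pvKeptB (pvLocal ni) ew) := by
    funext s i; exact pvStep_eq _ s i
  rw [show ((pvAdjA (pvLocal ni) (List.replicate ni.length []) ew).map
      (fun row => PySem.List.sorted2 row (fun p => p.1) (fun p => p.2))).length = ni.length by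
    simpa using hAlen]
  rw [hsteps, pv_vw_eq]
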